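-- pv_equiv track=rewrite | github.com/dfainber/RiskManager | generate_risk_report_meeting.py | _apply_text_color_swap
-- ===== SOURCE A (Python) =====
-- _TEXT_COLOR_MAP = {
--     "#94a3b8": "#475569",  # slate-400 → slate-600 (most common light text)
--     "#cbd5e1": "#475569",  # slate-300
--     "#e2e8f0": "#475569",  # slate-200
--     "#facc15": "#a16207",  # yellow-400 → yellow-700 (soft mark, etc)
--     "#fbbf24": "#a16207",  # amber-400
--     "#eab308": "#854d0e",  # yellow-500
--     "#fb923c": "#c2410c",  # orange-400 → orange-700 (GANCHO label)
--     "#60a5fa": "#1d4ed8",  # blue-400 → blue-700 (base-63 marker)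
--     "#64748b": "#334155",  # slate-500 → slate-700
--     "#f87171": "#dc2626",  # red-400 → red-600 (improve negative-text contrast)
--     "#888888": "#555555",  # gray text
--     "#aaaaaa": "#666666",
--     "#bbbbbb": "#666666",
--     "#777":    "#555",     # short hex muted gray
--     "#777777": "#555555",
--     # Multi-line chart palette (VaR Histórico — Fund + PMs) and accent strokes.
--     # Original mid-saturation hues read fine on dark but soften on white;
--     # darken to ~5:1+ contrast for the meeting big screen.
--     "#1a8fd1": "#0e5a8a",  # BVaR sparkline blue / LF line
--     "#5aa3e8": "#1d4ed8",  # CI line (brand blue)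
--     "#22d3ee": "#0e7490",  # RJ cyan
--     "#a78bfa": "#6d28d9",  # JD purple
--     "#f472b6": "#be185d",  # Stress sparkline pink
-- }
--
-- def _apply_text_color_swap(html: str) -> str:
--     """Darken low-contrast text colors on white. Targets `color:#XXX` plus
--     `fill="#XXX"` and `fill='#XXX'` (SVG text uses fill for color)."""
--     for src, dst in _TEXT_COLOR_MAP.items():
--         for pat, repl in (
--             (f"color:{src}",     f"color:{dst}"),
--             (f"color: {src}",    f"color: {dst}"),
--             (f'fill="{src}"',    f'fill="{dst}"'),
--             (f"fill='{src}'",    f"fill='{dst}'"),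
--             (f'stroke="{src}"',  f'stroke="{dst}"'),
--             (f"stroke='{src}'",  f"stroke='{dst}'"),
--         ):
--             html = html.replace(pat, repl)
--     return html
-- ===== SOURCE B (Python) =====
-- # B: instead of 120 sequential whole-string str.replace passes, split the string
-- # once on '#' and, at each '#' site, apply the first table rule whose context
-- # suffix and hex prefix match; one pass over the parts, then join.
--
-- _PAIRS = [
--     ("#94a3b8", "#475569"),
--     ("#cbd5e1", "#475569"),
--     ("#e2e8f0", "#475569"),
--     ("#facc15", "#a16207"),
--     ("#fbbf24", "#a16207"),
--     ("#eab308", "#854d0e"),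
--     ("#fb923c", "#c2410c"),
--     ("#60a5fa", "#1d4ed8"),
--     ("#64748b", "#334155"),
--     ("#f87171", "#dc2626"),
--     ("#888888", "#555555"),
--     ("#aaaaaa", "#666666"),
--     ("#bbbbbb", "#666666"),
--     ("#777",    "#555"),
--     ("#777777", "#555555"),
--     ("#1a8fd1", "#0e5a8a"),
--     ("#5aa3e8", "#1d4ed8"),
--     ("#22d3ee", "#0e7490"),
--     ("#a78bfa", "#6d28d9"),
--     ("#f472b6", "#be185d"),
-- ]
--
-- _FORMS = [
--     ("color:", ""),
--     ("color: ", ""),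
--     ('fill="', '"'),
--     ("fill='", "'"),
--     ('stroke="', '"'),
--     ("stroke='", "'"),
-- ]
--
-- _RULES = [
--     (pre, src[1:] + suf, dst[1:] + suf)
--     for src, dst in _PAIRS
--     for pre, suf in _FORMS
-- ]
--
--
-- def _apply_text_color_swap(html: str) -> str:
--     parts = html.split("#")
--     out = [parts[0]]
--     prev = parts[0]
--     for part in parts[1:]:
--         for pre, s, d in _RULES:
--             if prev.endswith(pre) and part.startswith(s):
--                 out.append(d + part[len(s):])
--                 break
--         else:
--             out.append(part)
--         prev = part
--     return "#".join(out)
-- ===== Notes on version B (the rewrite author's own statement) =====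
-- stated objective: faster
-- what changed: A runs 120 sequential whole-string str.replace passes (20 colors x 6 delimiter forms); B splits the string once at the hash characters and, in a single pass over the parts, applies at each '#' site the first table rule whose context prefix ends the previous part and whose hex code starts the current one.
import Mathlib
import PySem

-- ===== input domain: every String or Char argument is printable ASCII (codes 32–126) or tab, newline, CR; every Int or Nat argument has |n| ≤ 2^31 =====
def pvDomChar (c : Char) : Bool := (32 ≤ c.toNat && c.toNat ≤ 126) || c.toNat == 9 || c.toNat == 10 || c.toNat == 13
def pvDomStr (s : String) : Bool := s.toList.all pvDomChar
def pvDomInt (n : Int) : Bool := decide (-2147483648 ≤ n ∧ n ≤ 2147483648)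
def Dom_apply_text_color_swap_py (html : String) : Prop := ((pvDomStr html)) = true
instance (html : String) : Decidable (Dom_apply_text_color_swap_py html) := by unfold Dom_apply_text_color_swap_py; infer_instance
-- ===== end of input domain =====

-- B replaces A's 120 sequential whole-string str.replace passes by one split on '#'
-- plus a first-matching-rule rewrite at each '#' site (alternative algorithm; return
-- value only — neither version mutates its argument).


-- ===== PORT A =====
-- _TEXT_COLOR_MAP, a dict literal (distinct keys, insertion order)
def colorPairs : List (String × String) :=
  [("#94a3b8", "#475569"), ("#cbd5e1", "#475569"), ("#e2e8f0", "#475569"),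
   ("#facc15", "#a16207"), ("#fbbf24", "#a16207"), ("#eab308", "#854d0e"),
   ("#fb923c", "#c2410c"), ("#60a5fa", "#1d4ed8"), ("#64748b", "#334155"),
   ("#f87171", "#dc2626"), ("#888888", "#555555"), ("#aaaaaa", "#666666"),
   ("#bbbbbb", "#666666"), ("#777", "#555"), ("#777777", "#555555"),
   ("#1a8fd1", "#0e5a8a"), ("#5aa3e8", "#1d4ed8"), ("#22d3ee", "#0e7490"),
   ("#a78bfa", "#6d28d9"), ("#f472b6", "#be185d")]

def colorMap : PySem.Dict String String := PySem.Dict.ofList colorPairs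

-- the inner tuple of six (pat, repl) f-string pairs
def sixForms (src dst : String) : List (String × String) :=
  [("color:" ++ src, "color:" ++ dst),
   ("color: " ++ src, "color: " ++ dst),
   ("fill=\"" ++ src ++ "\"", "fill=\"" ++ dst ++ "\""),
   ("fill='" ++ src ++ "'", "fill='" ++ dst ++ "'"),
   ("stroke=\"" ++ src ++ "\"", "stroke=\"" ++ dst ++ "\""),
   ("stroke='" ++ src ++ "'", "stroke='" ++ dst ++ "'")]

def apply_text_color_swap_py (html : String) : String :=
  colorMap.items.foldl
    (fun h sd =>
      (sixForms sd.1 sd.2).foldl (fun h2 pr => PySem.Str.replace h2 pr.1 pr.2) h)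
    html

-- ===== PORT B =====
-- _PAIRS (char-list level: all of Source B's string work is ported through PySem.Chars)
def bPairs : List (List Char × List Char) :=
  [("#94a3b8".toList, "#475569".toList), ("#cbd5e1".toList, "#475569".toList),
   ("#e2e8f0".toList, "#475569".toList), ("#facc15".toList, "#a16207".toList),
   ("#fbbf24".toList, "#a16207".toList), ("#eab308".toList, "#854d0e".toList),
   ("#fb923c".toList, "#c2410c".toList), ("#60a5fa".toList, "#1d4ed8".toList),
   ("#64748b".toList, "#334155".toList), ("#f87171".toList, "#dc2626".toList),
   ("#888888".toList, "#555555".toList), ("#aaaaaa".toList, "#666666".toList),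
   ("#bbbbbb".toList, "#666666".toList), ("#777".toList, "#555".toList),
   ("#777777".toList, "#555555".toList), ("#1a8fd1".toList, "#0e5a8a".toList),
   ("#5aa3e8".toList, "#1d4ed8".toList), ("#22d3ee".toList, "#0e7490".toList),
   ("#a78bfa".toList, "#6d28d9".toList), ("#f472b6".toList, "#be185d".toList)]

-- _FORMS
def bForms : List (List Char × List Char) :=
  [("color:".toList, "".toList), ("color: ".toList, "".toList),
   ("fill=\"".toList, "\"".toList), ("fill='".toList, "'".toList),
   ("stroke=\"".toList, "\"".toList), ("stroke='".toList, "'".toList)]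

-- _RULES = [(pre, src[1:] + suf, dst[1:] + suf) ...]  (src[1:] is the slice)
def bRules : List (List Char × List Char × List Char) :=
  bPairs.flatMap (fun sd =>
    bForms.map (fun ps =>
      (ps.1, PySem.List.slice sd.1 (some 1) none ++ ps.2,
             PySem.List.slice sd.2 (some 1) none ++ ps.2)))

-- the inner 'for pre, s, d in _RULES: … break / else' loop
def tryRules (prev part : List Char) :
    List (List Char × List Char × List Char) → Option (List Char)
  | [] => none
  | r :: rest =>
      if PySem.Chars.endswith prev r.1 && PySem.Chars.startswith part r.2.1 then
        some (r.2.2 ++ PySem.List.slice part (some (r.2.1.length : Int)) none)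
      else tryRules prev part rest

def apply_text_color_swap_py_alt (html : String) : String :=
  -- parts = html.split("#")  (split on a one-char separator, Chars level)
  let parts := PySem.Chars.splitOn html.toList ['#']
  -- out = [parts[0]]; prev = parts[0]; for part in parts[1:]: … ; "#".join(out)
  let st := (parts.drop 1).foldl
    (fun (st : List (List Char) × List Char) part =>
      match tryRules st.2 part bRules with
      | some newPart => (st.1 ++ [newPart], part)
      | none => (st.1 ++ [part], part))
    ([parts.headI], parts.headI)
  String.ofList (PySem.Chars.join ['#'] st.1)

-- ===== PRECONDITION & SPEC =====
-- the 20 source hex codes (without '#') and the six context prefixes of the table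
def srcHexes : List (List Char) :=
  ["94a3b8", "cbd5e1", "e2e8f0", "facc15", "fbbf24", "eab308", "fb923c",
   "60a5fa", "64748b", "f87171", "888888", "aaaaaa", "bbbbbb", "777", "777777",
   "1a8fd1", "5aa3e8", "22d3ee", "a78bfa", "f472b6"].map String.toList

def ctxPres : List (List Char) :=
  ["color:", "color: ", "fill=\"", "fill='", "stroke=\"", "stroke='"].map String.toList

-- Pre_ excludes inputs where a '#' directly followed by a mapped source hex code is
-- chased, within the same match window, by another '#' (the stretch between them both
-- starts with a source hex and ends with a context prefix, too short to keep the two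
-- apart): there A's sequential passes interact through overlapping matches and
-- rewritten context, and A's pass-order-dependent result is as defensible as B's.
def Pre_apply_text_color_swap_py (html : String) : Prop :=
  ∀ c ∈ ((PySem.Chars.splitOn html.toList ['#']).drop 1).dropLast,
    ¬ ∃ h ∈ srcHexes, ∃ p ∈ ctxPres, h <+: c ∧ p <:+ c ∧ c.length < h.length + p.length
instance (html : String) : Decidable (Pre_apply_text_color_swap_py html) := by
  unfold Pre_apply_text_color_swap_py; infer_instance

def pvWitness_apply_text_color_swap_py : String := "color:#94a3b8;fill=\"#777777\""

def Spec_apply_text_color_swap_py (html : String) (out : String) : Prop := out = apply_text_color_swap_py_alt html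
instance (html : String) (out : String) : Decidable (Spec_apply_text_color_swap_py html out) := by unfold Spec_apply_text_color_swap_py; infer_instance

-- ===== CLAIM (what is proved, stated in full; the proofs are below) =====
def Claim_equal_apply_text_color_swap_py : Prop := ∀ (html : String), Dom_apply_text_color_swap_py html → Pre_apply_text_color_swap_py html → Spec_apply_text_color_swap_py html (apply_text_color_swap_py html)

-- ===== LEMMAS AND PROOFS =====

-- rule projections: a rule is (pre, s, d); pattern/replacement of pass (pre, s, d)
def patR (r : List Char × List Char × List Char) : List Char := r.1 ++ '#' :: r.2.1
def repR (r : List Char × List Char × List Char) : List Char := r.1 ++ '#' :: r.2.2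

-- one replace pass, as a one-char-at-a-time prefix scanner (bridged to PySem below)
def subChars (p0 : Char) (prest repl : List Char) : List Char → List Char
  | [] => []
  | c :: t =>
      if (p0 :: prest).isPrefixOf (c :: t) then
        repl ++ subChars p0 prest repl (t.drop prest.length)
      else
        c :: subChars p0 prest repl t
termination_by s => s.length
decreasing_by
  · simp
  · simp

def subP (pat rep l : List Char) : List Char :=
  match pat with
  | [] => l
  | p0 :: ps => subChars p0 ps rep l

-- '#'-joined chunk view of a string
def joinH (b : List Char) : List (List Char) → List Char
  | [] => b
  | c :: cs => b ++ '#' :: joinH c cs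

-- structural version of s.split('#')
def hsplit : List Char → List (List Char)
  | [] => [[]]
  | c :: t => if c = '#' then [] :: hsplit t else (c :: (hsplit t).headI) :: (hsplit t).tail

-- per-site machinery
def fireB (r : List Char × List Char × List Char) (prev c : List Char) : Bool :=
  r.1.isSuffixOf prev && r.2.1.isPrefixOf c

def applyR (r : List Char × List Char × List Char) (c : List Char) : List Char :=
  r.2.2 ++ c.drop r.2.1.length

def stepR (r : List Char × List Char × List Char) (prev c : List Char) : List Char :=
  if fireB r prev c then applyR r c else c

def cascade (rs : List (List Char × List Char × List Char)) (prev c : List Char) : List Char :=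
  rs.foldl (fun c r => stepR r prev c) c

def firstF (rs : List (List Char × List Char × List Char)) (prev c : List Char) : List Char :=
  match rs with
  | [] => c
  | r :: rest => if fireB r prev c then applyR r c else firstF rest prev c

def goldT (rs : List (List Char × List Char × List Char)) (prev : List Char) :
    List (List Char) → List (List Char)
  | [] => []
  | c :: cs => cascade rs prev c :: goldT rs c cs

-- what subChars does to the chunk list in one pass
def passMap (r : List Char × List Char × List Char) (prev : List Char) :
    List (List Char) → List (List Char)
  | [] => []
  | c :: cs =>
      if fireB r prev c then applyR r c :: passMap r (c.drop r.2.1.length) cs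
      else c :: passMap r c cs

-- the per-chunk precondition extracted from Pre_
def preFact (c : List Char) : Prop :=
  ¬ ∃ h ∈ srcHexes, ∃ p ∈ ctxPres, h <+: c ∧ p <:+ c ∧ c.length < h.length + p.length

-- ---------- decidable table facts ----------
set_option maxRecDepth 100000 in
theorem ruleFacts : ∀ r ∈ bRules, r.1 ≠ [] ∧ r.2.1 ≠ [] ∧ '#' ∉ r.1 ∧ '#' ∉ r.2.1 ∧
    '#' ∉ r.2.2 ∧ r.2.2.length = r.2.1.length ∧ r.1 ∈ ctxPres := by decide

set_option maxRecDepth 100000 in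
theorem fAnchor : ∀ r ∈ bRules, ∃ h ∈ srcHexes, h <+: r.2.1 ∧ r.2.1.length ≤ h.length + 1 ∧
    (h.length < r.2.1.length → ∀ p ∈ ctxPres, p.head? ≠ r.2.1.getLast?) := by decide

set_option maxRecDepth 1000000 in
theorem fDS : ∀ r ∈ bRules, ∀ p ∈ ctxPres, ∀ m : Nat, 1 ≤ m → m ≤ p.length →
    m ≤ r.2.2.length → ((p.take m <:+ r.2.2) ↔ (p.take m <:+ r.2.1)) := by decide

set_option maxRecDepth 1000000 in
theorem fNoRefire : ∀ r ∈ bRules, ∀ r' ∈ bRules,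
    ¬ (r'.2.1 <+: r.2.2) ∧ ¬ (r.2.2 <+: r'.2.1) := by decide

-- ---------- split / join infrastructure ----------
theorem hsplit_ne_nil (s : List Char) : hsplit s ≠ [] := by
  cases s with
  | nil => simp [hsplit]
  | cons c t => by_cases h : c = '#' <;> simp [hsplit, h]

theorem go_spec (fuel : Nat) : ∀ (l cur : List Char) (accs : List (List Char)),
    l.length ≤ fuel →
    PySem.Chars.splitOn.go ['#'] fuel l cur accs =
      accs.reverse ++ (cur.reverse ++ (hsplit l).headI) :: (hsplit l).tail := by
  induction fuel with
  | zero =>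
      intro l cur accs h
      have : l = [] := List.length_eq_zero_iff.mp (Nat.le_zero.mp h)
      subst this
      simp [PySem.Chars.splitOn.go, hsplit]
  | succ n ih =>
      intro l cur accs h
      cases l with
      | nil => simp [PySem.Chars.splitOn.go, hsplit]
      | cons c t =>
          rw [PySem.Chars.splitOn.go]
          by_cases hc : c = '#'
          · subst hc
            have hpre : ['#'].isPrefixOf ('#' :: t) = true := by
              simp [List.isPrefixOf]
            simp only [hpre, if_pos]
            have hdrop : List.drop (['#'].length) ('#' :: t) = t := by simp
            rw [hdrop, ih t [] (cur.reverse :: accs) (by simpa using Nat.le_of_succ_le_succ h)]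
            obtain ⟨b, cs, hbc⟩ : ∃ b cs, hsplit t = b :: cs := by
              cases hh : hsplit t with
              | nil => exact absurd hh (hsplit_ne_nil t)
              | cons b cs => exact ⟨b, cs, rfl⟩
            simp [hsplit, hbc]
          · have hpre : ['#'].isPrefixOf (c :: t) = false := by
              simp [List.isPrefixOf]
              intro hcc; exact hc hcc.symm
            simp only [hpre, Bool.false_eq_true, if_false]
            rw [ih t (c :: cur) accs (by simpa using Nat.le_of_succ_le_succ h)]
            simp [hsplit, hc]

theorem splitOn_hash (s : List Char) : PySem.Chars.splitOn s ['#'] = hsplit s := by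
  rw [PySem.Chars.splitOn]
  rw [go_spec (s.length + 1) s [] [] (by omega)]
  obtain ⟨b, cs, hbc⟩ : ∃ b cs, hsplit s = b :: cs := by
    cases hh : hsplit s with
    | nil => exact absurd hh (hsplit_ne_nil s)
    | cons b cs => exact ⟨b, cs, rfl⟩
  simp [hbc]

theorem hsplit_no_hash (s : List Char) : ∀ c ∈ hsplit s, '#' ∉ c := by
  induction s with
  | nil => simp [hsplit]
  | cons c t ih =>
      by_cases hc : c = '#'
      · subst hc
        simpa [hsplit] using ih
      · obtain ⟨b, cs, hbc⟩ : ∃ b cs, hsplit t = b :: cs := by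
          cases hh : hsplit t with
          | nil => exact absurd hh (hsplit_ne_nil t)
          | cons b cs => exact ⟨b, cs, rfl⟩
        intro x hx
        simp only [hsplit, hc, hbc, List.headI, List.tail] at hx
        rcases List.mem_cons.mp hx with h1 | h2
        · subst h1
          have hb : '#' ∉ b := ih b (by simp [hbc])
          simp [hb]
          intro h'; exact hc h'.symm
        · exact ih x (by simp [hbc, h2])

theorem joinH_cons_left (c : Char) (b : List Char) (cs : List (List Char)) :
    joinH (c :: b) cs = c :: joinH b cs := by
  cases cs <;> simp [joinH]

theorem hsplit_join (s : List Char) :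
    joinH ((hsplit s).headI) ((hsplit s).tail) = s := by
  induction s with
  | nil => simp [hsplit, joinH]
  | cons c t ih =>
      obtain ⟨b, cs, hbc⟩ : ∃ b cs, hsplit t = b :: cs := by
        cases hh : hsplit t with
        | nil => exact absurd hh (hsplit_ne_nil t)
        | cons b cs => exact ⟨b, cs, rfl⟩
      rw [hbc] at ih
      by_cases hc : c = '#'
      · subst hc
        simp only [hsplit, hbc, List.headI, List.tail]
        show joinH [] (b :: cs) = '#' :: t
        rw [← ih]
        simp [joinH]
      · simp only [hsplit, if_neg hc, hbc, List.headI, List.tail] at ih ⊢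
        rw [joinH_cons_left, ih]

theorem join_eq_joinH (b : List Char) (cs : List (List Char)) :
    PySem.Chars.join ['#'] (b :: cs) = joinH b cs := by
  induction cs generalizing b with
  | nil => simp [PySem.Chars.join, joinH, List.intercalate]
  | cons c rest ih =>
      show PySem.Chars.join ['#'] (b :: c :: rest) = b ++ '#' :: joinH c rest
      rw [← ih c]
      simp [PySem.Chars.join, List.intercalate, List.intersperse]

theorem joinH_append_left (u v : List Char) (cs : List (List Char)) :
    joinH (u ++ v) cs = u ++ joinH v cs := by
  cases cs <;> simp [joinH]

theorem joinH_drop (c : List Char) (cs : List (List Char)) (n : Nat) (h : n ≤ c.length) :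
    (joinH c cs).drop n = joinH (c.drop n) cs := by
  cases cs <;> simp [joinH, List.drop_append_of_le_length h]

theorem prefix_joinH (c : List Char) (cs : List (List Char)) : c <+: joinH c cs := by
  cases cs <;> simp [joinH]

-- hs <+: joinH c cs ↔ hs <+: c, for '#'-free hs and c
theorem prefix_hash_iff (hs c : List Char) (cs : List (List Char))
    (hhs : '#' ∉ hs) : (hs <+: joinH c cs ↔ hs <+: c) := by
  cases cs with
  | nil => simp [joinH]
  | cons c2 rest =>
      rw [joinH]
      constructor
      · intro h
        by_cases hl : hs.length ≤ c.length
        · exact (List.isPrefix_append_of_length hl).mp h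
        · exfalso
          obtain ⟨t, ht⟩ := h
          have h1 : (hs ++ t)[c.length]? = hs[c.length]? :=
            List.getElem?_append_left (by omega)
          have h2 : (c ++ '#' :: joinH c2 rest)[c.length]? = some '#' := by
            rw [List.getElem?_append_right (by omega)]
            simp
          rw [ht, h2] at h1
          exact hhs (List.mem_of_getElem? h1.symm)
      · intro h
        exact h.trans (List.prefix_append _ _)

-- ---------- PySem replace = one-char scanner ----------
theorem go_eq_subChars (p0 : Char) (prest repl : List Char) :
    ∀ (fuel : Nat) (l acc : List Char), l.length ≤ fuel →
      PySem.Chars.replace.go (p0 :: prest) repl fuel l acc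
        = acc.reverse ++ subChars p0 prest repl l := by
  intro fuel
  induction fuel with
  | zero =>
      intro l acc h
      have : l = [] := List.length_eq_zero_iff.mp (Nat.le_zero.mp h)
      subst this
      simp [PySem.Chars.replace.go, subChars]
  | succ n ih =>
      intro l acc h
      cases l with
      | nil => simp [PySem.Chars.replace.go, subChars]
      | cons c t =>
          rw [PySem.Chars.replace.go, subChars]
          by_cases hp : (p0 :: prest).isPrefixOf (c :: t) = true
          · simp only [hp, if_pos]
            have hlen : (t.drop prest.length).length ≤ n := by
              simp only [List.length_drop]
              simp only [List.length_cons] at h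
              omega
            rw [show List.drop (p0 :: prest).length (c :: t) = t.drop prest.length by simp]
            rw [ih _ _ hlen]
            simp
          · simp only [hp, Bool.false_eq_true, if_false]
            rw [ih t (c :: acc) (by simpa using Nat.le_of_succ_le_succ h)]
            simp

theorem replace_eq_subP (s pat repl : List Char) (h : pat ≠ []) :
    PySem.Chars.replace s pat repl = subP pat repl s := by
  cases pat with
  | nil => exact absurd rfl h
  | cons p0 prest =>
      rw [PySem.Chars.replace, subP]
      simp only [List.isEmpty_cons, Bool.false_eq_true, if_false]
      simpa using go_eq_subChars p0 prest repl s.length s [] (Nat.le_refl _)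

-- ---------- boundary lemmas for one pass ----------
-- a '#'-free string with a '#'-pattern is left unchanged
theorem subP_no_hash (pat rep x : List Char) (hp : '#' ∈ pat) (hx : '#' ∉ x) :
    subP pat rep x = x := by
  cases pat with
  | nil => rfl
  | cons p0 ps =>
      rw [subP]
      induction x with
      | nil => rw [subChars]
      | cons c t ih =>
          rw [subChars]
          have hnp : ¬ ((p0 :: ps).isPrefixOf (c :: t) = true) := by
            rw [List.isPrefixOf_iff_prefix]
            intro hpre
            exact hx (hpre.subset hp)
          rw [if_neg hnp, ih (fun h => hx (List.mem_cons_of_mem c h))]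

-- a match of pre++'#'::hs against x++'#'::z ('#'-free x, pre) pins the boundary
theorem match_pin (pre hs x z : List Char) (hpre : '#' ∉ pre) (hx : '#' ∉ x)
    (h : (pre ++ '#' :: hs) <+: (x ++ '#' :: z)) : pre = x ∧ hs <+: z := by
  obtain ⟨t, ht⟩ := h
  rw [show (pre ++ '#' :: hs) ++ t = pre ++ '#' :: (hs ++ t) by simp] at ht
  rcases Nat.lt_trichotomy pre.length x.length with hl | hl | hl
  · exfalso
    have h1 : (pre ++ '#' :: (hs ++ t))[pre.length]? = some '#' := by
      rw [List.getElem?_append_right (by omega)]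
      simp
    have h2 : (x ++ '#' :: z)[pre.length]? = x[pre.length]? :=
      List.getElem?_append_left (by omega)
    rw [ht, h2] at h1
    exact hx (List.mem_of_getElem? h1)
  · have hpx : pre = x := by
      have h1 := congrArg (List.take pre.length) ht
      rw [List.take_append_of_le_length (le_refl _),
        List.take_append_of_le_length (by omega), List.take_length, hl,
        List.take_length] at h1
      exact h1
    subst hpx
    refine ⟨rfl, ?_⟩
    have h2 := List.append_cancel_left ht
    exact ⟨t, (List.cons_eq_cons.mp h2).2⟩
  · exfalso
    have h1 : (pre ++ '#' :: (hs ++ t))[x.length]? = pre[x.length]? :=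
      List.getElem?_append_left (by omega)
    have h2 : (x ++ '#' :: z)[x.length]? = some '#' := by
      rw [List.getElem?_append_right (by omega)]
      simp
    rw [ht, h2] at h1
    exact hpre (List.mem_of_getElem? h1.symm)

-- no fire at this boundary: the scanner copies x and '#' and moves on
theorem subP_boundary_nofire (pre hs rep x z : List Char) (hne : pre ≠ [])
    (hpre : '#' ∉ pre) (hx : '#' ∉ x) (hnf : ¬ (pre <:+ x ∧ hs <+: z)) :
    subP (pre ++ '#' :: hs) rep (x ++ '#' :: z) =
      x ++ '#' :: subP (pre ++ '#' :: hs) rep z := by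
  obtain ⟨q, qs, rfl⟩ : ∃ q qs, pre = q :: qs := by
    cases pre with
    | nil => exact absurd rfl hne
    | cons q qs => exact ⟨q, qs, rfl⟩
  rw [show (q :: qs) ++ '#' :: hs = q :: (qs ++ '#' :: hs) by simp, subP]
  induction x with
  | nil =>
      rw [List.nil_append, subChars]
      have hq : ¬ ((q :: (qs ++ '#' :: hs)).isPrefixOf ('#' :: z) = true) := by
        rw [List.isPrefixOf_iff_prefix]
        intro hp
        obtain ⟨t, ht⟩ := hp
        have h1 : q = '#' := by
          have := congrArg (List.head?) ht
          simpa using this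
        exact hpre (h1 ▸ List.mem_cons_self)
      rw [if_neg hq]
      rfl
  | cons c t ih =>
      rw [List.cons_append, subChars]
      have hnp : ¬ ((q :: (qs ++ '#' :: hs)).isPrefixOf (c :: (t ++ '#' :: z)) = true) := by
        rw [List.isPrefixOf_iff_prefix]
        intro hp
        have := match_pin (q :: qs) hs (c :: t) z hpre hx (by simpa using hp)
        exact hnf ⟨this.1 ▸ List.suffix_refl _, this.2⟩
      rw [if_neg hnp, ih (fun h => hx (List.mem_cons_of_mem c h))
        (fun h => hnf ⟨h.1.trans (List.suffix_cons c t), h.2⟩)]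
      simp

-- fire at this boundary: the scanner rewrites the hex and continues after it
theorem subP_boundary_fire (pre hs ds rep x z : List Char)
    (hrep : rep = pre ++ '#' :: ds)
    (hpre : '#' ∉ pre) (hx : '#' ∉ x) (hsx : pre <:+ x) (hhz : hs <+: z) :
    subP (pre ++ '#' :: hs) rep (x ++ '#' :: z) =
      x ++ '#' :: (ds ++ subP (pre ++ '#' :: hs) rep (z.drop hs.length)) := by
  obtain ⟨u, hu⟩ := hsx
  subst hu
  induction u with
  | nil =>
      rw [List.nil_append]
      cases pre with
      | nil =>
          rw [List.nil_append, List.nil_append, subP, subChars]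
          have hp : ('#' :: hs).isPrefixOf ('#' :: z) = true := by
            rw [List.isPrefixOf_iff_prefix, List.cons_prefix_cons]
            exact ⟨rfl, hhz⟩
          rw [if_pos hp, hrep]
          simp [subP]
      | cons q qs =>
          rw [show ((q :: qs) ++ '#' :: hs) = q :: (qs ++ '#' :: hs) by simp, subP,
            show ((q :: qs) ++ '#' :: z) = q :: (qs ++ '#' :: z) by simp, subChars]
          obtain ⟨t, ht⟩ := hhz
          have hp : (q :: (qs ++ '#' :: hs)).isPrefixOf (q :: (qs ++ '#' :: z)) = true := by
            rw [List.isPrefixOf_iff_prefix, List.cons_prefix_cons]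
            exact ⟨rfl, ⟨t, by simp [← ht]⟩⟩
          rw [if_pos hp, hrep]
          have hd : (qs ++ '#' :: z).drop (qs ++ '#' :: hs).length = z.drop hs.length := by
            rw [List.drop_append]
            simp
          rw [hd]
          simp [subP]
  | cons c u ih =>
      rw [List.cons_append, List.cons_append]
      have hx' : '#' ∉ u ++ pre := fun h => hx (List.mem_cons_of_mem c h)
      obtain ⟨q, qs, hq⟩ : ∃ q qs, pre ++ '#' :: hs = q :: qs :=
        match pre with
        | [] => ⟨'#', hs, rfl⟩
        | p :: ps => ⟨p, ps ++ '#' :: hs, by simp⟩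
      rw [hq, subP, subChars]
      have hnp : ¬ ((q :: qs).isPrefixOf (c :: (u ++ pre ++ '#' :: z)) = true) := by
        rw [List.isPrefixOf_iff_prefix]
        intro hp
        rw [← hq] at hp
        have := match_pin pre hs (c :: (u ++ pre)) z hpre
          (by simpa using hx) (by simpa using hp)
        have hlen := congrArg List.length this.1
        simp at hlen
        omega
      rw [if_neg hnp]
      have := ih hx'
      rw [hq, subP] at this
      rw [show (u ++ pre) ++ '#' :: z = u ++ pre ++ '#' :: z by simp] at this
      rw [this]
      simp

-- ---------- suffix toolbox ----------
theorem suffix_drop_of_suffix (p a : List Char) (k : Nat) (h : p <:+ a)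
    (hl : k + p.length ≤ a.length) : p <:+ a.drop k := by
  rw [List.suffix_iff_eq_drop] at h ⊢
  rw [List.drop_drop, List.length_drop]
  rw [show k + ((a.length - k) - p.length) = a.length - p.length by omega]
  exact h

theorem suffix_of_suffix_drop (p a : List Char) (k : Nat) (h : p <:+ a.drop k) :
    p <:+ a := h.trans (List.drop_suffix k a)

theorem suffix_of_append_right (p u v : List Char) (h : p <:+ (u ++ v))
    (hl : p.length ≤ v.length) : p <:+ v := by
  obtain ⟨w, hw⟩ := h
  have hlen : w.length + p.length = u.length + v.length := by
    simpa using congrArg List.length hw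
  have h2 := congrArg (List.drop u.length) hw
  rw [List.drop_append_of_le_length (le_refl _), List.drop_length, List.nil_append] at h2
  rw [List.drop_append_of_le_length (by omega)] at h2
  exact ⟨w.drop u.length, h2⟩

theorem suffix_split (p u v : List Char) (hl : v.length ≤ p.length) :
    (p <:+ (u ++ v)) ↔
      (p.take (p.length - v.length) <:+ u ∧ p.drop (p.length - v.length) = v) := by
  constructor
  · intro h
    obtain ⟨w, hw⟩ := h
    have hlen : w.length + p.length = u.length + v.length := by
      have := congrArg List.length hw
      simpa using this
    constructor
    · refine ⟨w, ?_⟩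
      have h1 := congrArg (List.take u.length) hw
      rw [List.take_append_of_le_length (le_refl _), List.take_length] at h1
      rw [List.take_append, List.take_of_length_le (by omega)] at h1
      rw [show u.length - w.length = p.length - v.length by omega] at h1
      exact h1
    · have h2 := congrArg (List.drop u.length) hw
      rw [List.drop_append_of_le_length (le_refl _), List.drop_length,
        List.nil_append] at h2
      rw [List.drop_append, List.drop_eq_nil_of_le (by omega), List.nil_append] at h2
      rw [show u.length - w.length = p.length - v.length by omega] at h2
      exact h2
  · rintro ⟨⟨w, hw⟩, hd⟩
    refine ⟨w, ?_⟩
    rw [show w ++ p = (w ++ p.take (p.length - v.length)) ++ p.drop (p.length - v.length)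
      by simp, hw, hd]

-- ---------- per-site machinery lemmas ----------
theorem prefix_append_cases (p u v : List Char) (h : p <+: (u ++ v)) :
    p <+: u ∨ u <+: p := by
  by_cases hl : p.length ≤ u.length
  · exact Or.inl ((List.isPrefix_append_of_length hl).mp h)
  · right
    have ht := List.prefix_iff_eq_take.mp h
    rw [List.take_append, List.take_of_length_le (by omega)] at ht
    exact ⟨v.take (p.length - u.length), ht.symm⟩

theorem refire_false (r r' : List Char × List Char × List Char)
    (hr : r ∈ bRules) (hr' : r' ∈ bRules) (t : List Char) :
    ¬ (r'.2.1 <+: (r.2.2 ++ t)) := by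
  intro h
  rcases prefix_append_cases _ _ _ h with h1 | h1
  · exact (fNoRefire r hr r' hr').1 h1
  · exact (fNoRefire r hr r' hr').2 h1

theorem cascade_inert (rs : List (List Char × List Char × List Char)) (prev c : List Char)
    (h : ∀ r ∈ rs, ¬ (r.2.1 <+: c)) : cascade rs prev c = c := by
  induction rs with
  | nil => rfl
  | cons r rest ih =>
      have hf : fireB r prev c = false := by
        have hn : r.2.1.isPrefixOf c = false := by
          rw [← Bool.not_eq_true, List.isPrefixOf_iff_prefix]
          exact h r List.mem_cons_self
        simp [fireB, hn]
      show cascade rest prev (stepR r prev c) = c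
      rw [stepR, hf]
      simp only [Bool.false_eq_true, if_false]
      exact ih (fun r' hr' => h r' (List.mem_cons_of_mem _ hr'))

theorem cascade_shape (rs : List (List Char × List Char × List Char)) (prev c : List Char)
    (hsub : ∀ r ∈ rs, r ∈ bRules) :
    cascade rs prev c = c ∨
      ∃ r ∈ bRules, r.2.1 <+: c ∧ cascade rs prev c = applyR r c := by
  induction rs with
  | nil => exact Or.inl rfl
  | cons r rest ih =>
      have hstep : cascade (r :: rest) prev c = cascade rest prev (stepR r prev c) := rfl
      by_cases hf : fireB r prev c = true
      · right
        have hpre : r.2.1 <+: c := by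
          have h2 := hf
          rw [fireB, Bool.and_eq_true, List.isPrefixOf_iff_prefix] at h2
          exact h2.2
        refine ⟨r, hsub r List.mem_cons_self, hpre, ?_⟩
        rw [hstep, stepR, if_pos hf]
        exact cascade_inert rest prev (applyR r c) (fun r' hr' =>
          refire_false r r' (hsub r List.mem_cons_self) (hsub r' (List.mem_cons_of_mem _ hr')) _)
      · rw [hstep, stepR, if_neg hf]
        exact ih (fun r' hr' => hsub r' (List.mem_cons_of_mem _ hr'))

-- firing forces the head of p to be c's char just left of the '#'-free zone: quote facts
theorem ctx_drop (c : List Char) (r0 : List Char × List Char × List Char)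
    (hr0 : r0 ∈ bRules) (hf : r0.2.1 <+: c) (hpc : preFact c) (p : List Char)
    (hp : p ∈ ctxPres) : (p <:+ c.drop r0.2.1.length ↔ p <:+ c) := by
  have hkc : r0.2.1.length ≤ c.length := hf.length_le
  by_cases hlen : r0.2.1.length + p.length ≤ c.length
  · exact ⟨fun h => suffix_of_suffix_drop p c _ h,
      fun h => suffix_drop_of_suffix p c _ h hlen⟩
  · constructor
    · intro h
      have := h.length_le
      rw [List.length_drop] at this
      omega
    · intro h
      exfalso
      obtain ⟨hx, hhx, hxs, hxl, hquote⟩ := fAnchor r0 hr0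
      by_cases hcl : c.length < hx.length + p.length
      · exact hpc ⟨hx, hhx, p, hp, hxs.trans hf, h, hcl⟩
      · have hk : hx.length + 1 = r0.2.1.length := by
          have := hxs.length_le
          omega
        have hq := hquote (by omega) p hp
        have hs1 : 0 < r0.2.1.length := by
          obtain ⟨-, hsne, -⟩ := ruleFacts r0 hr0
          exact List.length_pos_iff.mpr hsne
        have h1 : p.head? = (c.drop (c.length - p.length)).head? := by
          conv_lhs => rw [List.suffix_iff_eq_drop.mp h]
        have h2 : r0.2.1.getLast? = (c.drop (c.length - p.length)).head? := by
          have hteq := List.prefix_iff_eq_take.mp hf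
          rw [List.head?_drop, List.getLast?_eq_getElem?]
          conv_lhs => rw [hteq]
          rw [List.length_take, min_eq_left hkc, List.getElem?_take_of_lt (by omega)]
          congr 1
          omega
        exact hq (h1.trans h2.symm)

theorem ctx_apply (c : List Char) (r0 : List Char × List Char × List Char)
    (hr0 : r0 ∈ bRules) (hf : r0.2.1 <+: c) (p : List Char)
    (hp : p ∈ ctxPres) : (p <:+ applyR r0 c ↔ p <:+ c) := by
  obtain ⟨-, -, -, -, -, hdl, -⟩ := ruleFacts r0 hr0
  have hkc : r0.2.1.length ≤ c.length := hf.length_le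
  rw [applyR]
  by_cases hlen : r0.2.1.length + p.length ≤ c.length
  · constructor
    · intro h
      have h2 := suffix_of_append_right p _ _ h (by rw [List.length_drop]; omega)
      exact suffix_of_suffix_drop p c _ h2
    · intro h
      exact List.suffix_append_of_suffix (suffix_drop_of_suffix p c _ h hlen)
  · by_cases hpc2 : p.length ≤ c.length
    · -- straddle: reduce both sides with suffix_split and compare via fDS
      have hvl : (c.drop r0.2.1.length).length ≤ p.length := by
        rw [List.length_drop]; omega
      have hcs : c = c.take r0.2.1.length ++ c.drop r0.2.1.length := by simp
      rw [suffix_split p _ _ hvl]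
      conv_rhs => rw [hcs]
      rw [suffix_split p _ _ hvl]
      have hst : c.take r0.2.1.length = r0.2.1 := (List.prefix_iff_eq_take.mp hf).symm
      rw [hst]
      have hm := fDS r0 hr0 p hp (p.length - (c.drop r0.2.1.length).length)
        (by rw [List.length_drop]; omega) (by omega) (by rw [hdl, List.length_drop]; omega)
      rw [hm]
    · -- p longer than c: both sides false
      constructor
      · intro h
        have := h.length_le
        simp [List.length_append, List.length_drop] at this
        omega
      · intro h
        have := h.length_le
        omega

-- ---------- one pass over the chunk view ----------
theorem passL1 (r : List Char × List Char × List Char) (hr : r ∈ bRules) :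
    ∀ (cs : List (List Char)) (b : List Char), '#' ∉ b → (∀ c ∈ cs, '#' ∉ c) →
      subP (patR r) (repR r) (joinH b cs) = joinH b (passMap r b cs) := by
  obtain ⟨hpne, hsne, hpreh, hsh, -, -, -⟩ := ruleFacts r hr
  intro cs
  induction cs with
  | nil =>
      intro b hb _
      show subP (patR r) (repR r) b = joinH b []
      rw [joinH]
      exact subP_no_hash _ _ b (by simp [patR]) hb
  | cons c rest ih =>
      intro b hb hcs
      have hc : '#' ∉ c := hcs c List.mem_cons_self
      have hrest : ∀ x ∈ rest, '#' ∉ x := fun x hx => hcs x (List.mem_cons_of_mem _ hx)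
      rw [joinH, passMap]
      by_cases hfb : fireB r b c = true
      · rw [if_pos hfb]
        rw [fireB, Bool.and_eq_true, List.isSuffixOf_iff_suffix,
          List.isPrefixOf_iff_prefix] at hfb
        have hkc : r.2.1.length ≤ c.length := hfb.2.length_le
        rw [show patR r = r.1 ++ '#' :: r.2.1 from rfl]
        rw [subP_boundary_fire r.1 r.2.1 r.2.2 (repR r) b (joinH c rest) rfl hpreh hb
          hfb.1 (hfb.2.trans (prefix_joinH c rest))]
        rw [joinH_drop c rest _ hkc]
        rw [show r.1 ++ '#' :: r.2.1 = patR r from rfl,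
          ih (c.drop r.2.1.length) (fun h => hc (List.mem_of_mem_drop h)) hrest]
        show _ = b ++ '#' :: joinH (applyR r c) (passMap r (c.drop r.2.1.length) rest)
        rw [applyR, joinH_append_left]
      · rw [if_neg hfb]
        rw [fireB, Bool.and_eq_true, List.isSuffixOf_iff_suffix,
          List.isPrefixOf_iff_prefix] at hfb
        rw [show patR r = r.1 ++ '#' :: r.2.1 from rfl]
        rw [subP_boundary_nofire r.1 r.2.1 (repR r) b (joinH c rest) hpne hpreh hb
          (fun hand => hfb ⟨hand.1, (prefix_hash_iff r.2.1 c rest hsh).mp hand.2⟩)]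
        rw [show r.1 ++ '#' :: r.2.1 = patR r from rfl, ih c hc hrest]
        show b ++ '#' :: joinH c (passMap r c rest) = joinH b (c :: passMap r c rest)
        rw [joinH]

-- ---------- '#'-freeness is preserved ----------
theorem cascade_no_hash : ∀ (rs : List (List Char × List Char × List Char)) (prev c : List Char),
    (∀ r ∈ rs, r ∈ bRules) → '#' ∉ c → '#' ∉ cascade rs prev c := by
  intro rs
  induction rs with
  | nil => intro prev c _ hc; exact hc
  | cons r rest ih =>
      intro prev c hrs hc
      show '#' ∉ cascade rest prev (stepR r prev c)
      refine ih prev _ (fun r' h => hrs r' (List.mem_cons_of_mem _ h)) ?_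
      rw [stepR]
      split_ifs with h
      · obtain ⟨-, -, -, -, hd, -, -⟩ := ruleFacts r (hrs r List.mem_cons_self)
        rw [applyR]
        intro hmem
        rcases List.mem_append.mp hmem with h1 | h1
        · exact hd h1
        · exact hc (List.mem_of_mem_drop h1)
      · exact hc

theorem goldT_no_hash (rs : List (List Char × List Char × List Char))
    (hrs : ∀ r ∈ rs, r ∈ bRules) :
    ∀ (cs : List (List Char)) (prev : List Char), (∀ c ∈ cs, '#' ∉ c) →
      ∀ x ∈ goldT rs prev cs, '#' ∉ x := by
  intro cs
  induction cs with
  | nil => intro prev _ x hx; simp [goldT] at hx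
  | cons c rest ih =>
      intro prev hcs x hx
      rw [goldT] at hx
      rcases List.mem_cons.mp hx with h1 | h1
      · subst h1
        exact cascade_no_hash rs prev c hrs (hcs c List.mem_cons_self)
      · exact ih c (fun y hy => hcs y (List.mem_cons_of_mem _ hy)) x h1

theorem goldT_nil (cs : List (List Char)) (prev : List Char) : goldT [] prev cs = cs := by
  induction cs generalizing prev with
  | nil => rfl
  | cons c rest ih => rw [goldT, cascade, List.foldl_nil, ih]

-- ---------- a pass on gold chunks extends every cascade by one rule ----------
theorem passPW (r : List Char × List Char × List Char)
    (rs : List (List Char × List Char × List Char))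
    (hr : r ∈ bRules) (hrs : ∀ r' ∈ rs, r' ∈ bRules) :
    ∀ (cs : List (List Char)) (a p : List Char),
      (∀ c ∈ cs.dropLast, preFact c) →
      (∀ q ∈ ctxPres, (q <:+ p ↔ q <:+ a)) →
      passMap r p (goldT rs a cs) = goldT (rs ++ [r]) a cs := by
  obtain ⟨hpne, hsne, hpreh, hsh, -, -, hpin⟩ := ruleFacts r hr
  intro cs
  induction cs with
  | nil => intro a p _ _; rfl
  | cons c rest ih =>
      intro a p hpre hsame
      rw [goldT, goldT, passMap]
      have hfeq : fireB r p (cascade rs a c) = fireB r a (cascade rs a c) := by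
        rw [fireB, fireB]
        have : r.1.isSuffixOf p = r.1.isSuffixOf a := by
          apply Bool.coe_iff_coe.mp
          rw [List.isSuffixOf_iff_suffix, List.isSuffixOf_iff_suffix]
          exact hsame r.1 hpin
        rw [this]
      have hcas : cascade (rs ++ [r]) a c = stepR r a (cascade rs a c) := by
        rw [cascade, cascade, List.foldl_append]
        rfl
      by_cases hfb : fireB r a (cascade rs a c) = true
      · have hscur : r.2.1 <+: cascade rs a c := by
          rw [fireB, Bool.and_eq_true, List.isPrefixOf_iff_prefix] at hfb
          exact hfb.2
        have hcur : cascade rs a c = c := by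
          rcases cascade_shape rs a c hrs with h1 | ⟨r'', hm'', hp'', heq''⟩
          · exact h1
          · exfalso
            rw [heq'', applyR] at hscur
            exact refire_false r'' r hm'' hr _ hscur
        rw [hfeq, if_pos hfb, hcas, stepR, if_pos hfb, hcur]
        cases rest with
        | nil => rfl
        | cons c2 rest2 =>
            have hpc : preFact c := hpre c (by simp)
            have hsc : r.2.1 <+: c := hcur ▸ hscur
            congr 1
            exact ih c (c.drop r.2.1.length)
              (fun x hx => hpre x (by simp at hx ⊢; tauto))
              (fun q hq => ctx_drop c r hr hsc hpc q hq)
      · rw [hfeq, if_neg hfb, hcas, stepR, if_neg hfb]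
        cases rest with
        | nil => rfl
        | cons c2 rest2 =>
            congr 1
            refine ih c (cascade rs a c)
              (fun x hx => hpre x (by simp at hx ⊢; tauto)) ?_
            rcases cascade_shape rs a c hrs with h1 | ⟨r'', hm'', hp'', heq''⟩
            · rw [h1]
              exact fun q _ => Iff.rfl
            · rw [heq'']
              exact fun q hq => ctx_apply c r'' hm'' hp'' q hq

-- ---------- all passes = per-site cascades ----------
theorem foldPasses : ∀ (rs : List (List Char × List Char × List Char)),
    (∀ r ∈ rs, r ∈ bRules) → ∀ (b : List Char) (cs : List (List Char)),
    '#' ∉ b → (∀ c ∈ cs, '#' ∉ c) → (∀ c ∈ cs.dropLast, preFact c) →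
    rs.foldl (fun l r => subP (patR r) (repR r) l) (joinH b cs) =
      joinH b (goldT rs b cs) := by
  intro rs
  induction rs using List.reverseRecOn with
  | nil =>
      intro _ b cs _ _ _
      rw [List.foldl_nil, goldT_nil]
  | append_singleton rs r ih =>
      intro hrs b cs hb hcs hpre
      have hrs' : ∀ r' ∈ rs, r' ∈ bRules := fun r' h => hrs r' (by simp [h])
      have hr : r ∈ bRules := hrs r (by simp)
      rw [List.foldl_append, List.foldl_cons, List.foldl_nil,
        ih hrs' b cs hb hcs hpre,
        passL1 r hr (goldT rs b cs) b hb (goldT_no_hash rs hrs' cs b hcs)]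
      exact congrArg (joinH b) (passPW r rs hr hrs' cs b b hpre (fun q _ => Iff.rfl))

-- ---------- B side: the foldl loop computes the gold chunks ----------
theorem tryRules_eq : ∀ (rs : List (List Char × List Char × List Char)) (prev part : List Char),
    (tryRules prev part rs).getD part = firstF rs prev part := by
  intro rs
  induction rs with
  | nil => intro prev part; rfl
  | cons r rest ih =>
      intro prev part
      rw [tryRules, firstF]
      have h1 : PySem.Chars.endswith prev r.1 = r.1.isSuffixOf prev := by
        apply Bool.coe_iff_coe.mp
        rw [PySem.Chars.endswith_iff, List.isSuffixOf_iff_suffix]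
      have h2 : PySem.Chars.startswith part r.2.1 = r.2.1.isPrefixOf part := by
        apply Bool.coe_iff_coe.mp
        rw [PySem.Chars.startswith_iff, List.isPrefixOf_iff_prefix]
      have hb : (PySem.Chars.endswith prev r.1 && PySem.Chars.startswith part r.2.1)
          = fireB r prev part := by
        rw [fireB, h1, h2]
      rw [hb]
      split_ifs with h
      · rw [Option.getD_some, applyR, PySem.List.slice_from_natCast]
      · exact ih prev part

theorem cascade_eq_firstF : ∀ (rs : List (List Char × List Char × List Char)),
    (∀ r ∈ rs, r ∈ bRules) → ∀ (prev c : List Char),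
    cascade rs prev c = firstF rs prev c := by
  intro rs
  induction rs with
  | nil => intro _ prev c; rfl
  | cons r rest ih =>
      intro hrs prev c
      rw [firstF]
      show cascade rest prev (stepR r prev c) = _
      rw [stepR]
      split_ifs with h
      · exact cascade_inert rest prev (applyR r c) (fun r' hr' =>
          refire_false r r' (hrs r List.mem_cons_self) (hrs r' (List.mem_cons_of_mem _ hr')) _)
      · exact ih (fun r' hr' => hrs r' (List.mem_cons_of_mem _ hr')) prev c

theorem foldB : ∀ (cs : List (List Char)) (acc : List (List Char)) (prev : List Char),
    (cs.foldl (fun (st : List (List Char) × List Char) part =>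
      match tryRules st.2 part bRules with
      | some newPart => (st.1 ++ [newPart], part)
      | none => (st.1 ++ [part], part)) (acc, prev)).1
      = acc ++ goldT bRules prev cs := by
  intro cs
  induction cs with
  | nil => intro acc prev; simp [goldT]
  | cons c rest ih =>
      intro acc prev
      rw [goldT, List.foldl_cons]
      have hfire : cascade bRules prev c = (tryRules prev c bRules).getD c := by
        rw [tryRules_eq, cascade_eq_firstF bRules (fun r h => h) prev c]
      cases h : tryRules prev c bRules with
      | some np =>
          rw [ih, hfire, h, Option.getD_some]
          simp
      | none =>
          rw [ih, hfire, h, Option.getD_none]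
          simp

-- ---------- A side: string-level fold to char-level fold ----------
theorem strFold_toList : ∀ (prs : List (String × String)) (s : String),
    (prs.foldl (fun h pr => PySem.Str.replace h pr.1 pr.2) s).toList =
      (prs.map (fun pr => (pr.1.toList, pr.2.toList))).foldl
        (fun l pr => PySem.Chars.replace l pr.1 pr.2) s.toList := by
  intro prs
  induction prs with
  | nil => intro s; rfl
  | cons pr rest ih =>
      intro s
      rw [List.foldl_cons, List.map_cons, List.foldl_cons, ih]
      congr 1
      simp

theorem foldl_foldl_eq_foldl_flatMap {α β γ : Type} (g : α → List γ) (f : β → γ → β) :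
    ∀ (l : List α) (b : β),
      l.foldl (fun h x => (g x).foldl f h) b = (l.flatMap g).foldl f b := by
  intro l
  induction l with
  | nil => intro b; rfl
  | cons x rest ih =>
      intro b
      simp only [List.foldl_cons, List.flatMap_cons, List.foldl_append]
      exact ih _

set_option maxRecDepth 100000 in
theorem colorMap_items : colorMap.items = colorPairs := by decide

set_option maxRecDepth 1000000 in
theorem charPairs_eq :
    ((colorPairs.flatMap (fun sd => sixForms sd.1 sd.2)).map
      (fun pr => (pr.1.toList, pr.2.toList)))
      = bRules.map (fun r => (patR r, repR r)) := by decide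

theorem foldl_replace_eq_subP : ∀ (rs : List (List Char × List Char × List Char)),
    (∀ r ∈ rs, r ∈ bRules) → ∀ (l : List Char),
    (rs.map (fun r => (patR r, repR r))).foldl
        (fun l pr => PySem.Chars.replace l pr.1 pr.2) l =
      rs.foldl (fun l r => subP (patR r) (repR r) l) l := by
  intro rs
  induction rs with
  | nil => intro _ l; rfl
  | cons r rest ih =>
      intro hrs l
      rw [List.map_cons, List.foldl_cons, List.foldl_cons,
        replace_eq_subP l (patR r) (repR r) (by simp [patR])]
      exact ih (fun r' h => hrs r' (List.mem_cons_of_mem _ h)) _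

-- ===== VERDICT (by name: the statement is the Claim_ definition above) =====
theorem apply_text_color_swap_py_spec : Claim_equal_apply_text_color_swap_py := by
  intro html _ hpre
  unfold Spec_apply_text_color_swap_py
  obtain ⟨b, cs, hbc⟩ : ∃ b cs, hsplit html.toList = b :: cs := by
    cases hh : hsplit html.toList with
    | nil => exact absurd hh (hsplit_ne_nil _)
    | cons b cs => exact ⟨b, cs, rfl⟩
  have hb : '#' ∉ b := hsplit_no_hash _ b (by rw [hbc]; exact List.mem_cons_self)
  have hcs : ∀ c ∈ cs, '#' ∉ c := fun c h =>
    hsplit_no_hash _ c (by rw [hbc]; exact List.mem_cons_of_mem _ h)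
  have hjoin : joinH b cs = html.toList := by
    have := hsplit_join html.toList
    rw [hbc] at this
    simpa using this
  have hprefacts : ∀ c ∈ cs.dropLast, preFact c := by
    intro c hc
    unfold Pre_apply_text_color_swap_py at hpre
    rw [splitOn_hash, hbc] at hpre
    exact hpre c (by simpa using hc)
  have hA : (apply_text_color_swap_py html).toList = joinH b (goldT bRules b cs) := by
    unfold apply_text_color_swap_py
    rw [colorMap_items,
      foldl_foldl_eq_foldl_flatMap (fun sd => sixForms sd.1 sd.2)
        (fun (h2 : String) (pr : String × String) => PySem.Str.replace h2 pr.1 pr.2)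
        colorPairs html,
      strFold_toList, charPairs_eq,
      foldl_replace_eq_subP bRules (fun r h => h) html.toList,
      ← hjoin,
      foldPasses bRules (fun r h => h) b cs hb hcs hprefacts]
  have hB : apply_text_color_swap_py_alt html = String.ofList (joinH b (goldT bRules b cs)) := by
    unfold apply_text_color_swap_py_alt
    rw [splitOn_hash, hbc]
    show String.ofList (PySem.Chars.join ['#']
      ((cs.foldl _ ([(b :: cs).headI], (b :: cs).headI)).1)) = _
    rw [show (b :: cs).headI = b from rfl, foldB cs [b] b,
      show [b] ++ goldT bRules b cs = b :: goldT bRules b cs from rfl,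
      join_eq_joinH]
  rw [hB, show apply_text_color_swap_py html
      = String.ofList ((apply_text_color_swap_py html).toList)
    from (String.ofList_toList).symm, hA]
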